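-- pv_equiv track=rewrite | github.com/ryotabol63/anime_okinawa | figsample.py | jointext
-- ===== SOURCE A (Python) =====
-- def jointext(textlist):
--     printtext = []
--     isodd = True
--     for text in textlist:
--         if isodd:
--             firsttext = text
--             isodd = False
--         else:
--             addtext = firsttext + '  ' + text
--             printtext.append(addtext)
--             isodd = True
--     if not isodd:
--         printtext.append(firsttext + '      ')
--     printtext_str = "\n".join(printtext)
--     return printtext_str
-- ===== SOURCE B (Python) =====
-- def jointext(textlist):
--     evens = textlist[0::2]
--     odds = textlist[1::2]
--     lines = [a + '  ' + b for a, b in zip(evens, odds)]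
--     if len(textlist) % 2:
--         lines.append(evens[-1] + '      ')
--     return "\n".join(lines)
-- ===== Notes on version B (the rewrite author's own statement) =====
-- stated objective: simpler
-- what changed: Replaces A's single-pass isodd/firsttext state machine with staged passes: stride-slice the list into evens (textlist[0::2]) and odds (textlist[1::2]), zip them into joined lines, and append the six-space leftover line from evens[-1] when the length is odd.
import Mathlib
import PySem

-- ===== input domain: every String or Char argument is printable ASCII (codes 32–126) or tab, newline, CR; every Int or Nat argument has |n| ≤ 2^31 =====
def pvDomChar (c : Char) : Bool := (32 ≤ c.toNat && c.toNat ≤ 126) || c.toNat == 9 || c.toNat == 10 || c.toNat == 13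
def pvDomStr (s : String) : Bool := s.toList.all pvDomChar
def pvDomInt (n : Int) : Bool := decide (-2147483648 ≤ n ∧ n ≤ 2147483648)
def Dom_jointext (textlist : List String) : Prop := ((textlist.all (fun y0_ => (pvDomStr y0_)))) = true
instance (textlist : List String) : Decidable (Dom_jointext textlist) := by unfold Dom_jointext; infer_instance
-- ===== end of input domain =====

-- B replaces A's isodd/firsttext state machine by staged passes: stride slices evens/odds, zip, leftover fix-up; objective: simpler.
-- ===== PORT A =====
-- A's loop: state (printtext, isodd, firsttext); firsttext starts unused (Python leaves it unbound; "" stands in, only read after it is set)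
def jointextStep (st : List String × Bool × String) (text : String) : List String × Bool × String :=
  if st.2.1 then (st.1, false, text)
  else (st.1 ++ [st.2.2 ++ "  " ++ text], true, st.2.2)

def jointext (textlist : List String) : String :=
  let st := textlist.foldl jointextStep ([], true, "")
  let printtext := if st.2.1 = false then st.1 ++ [st.2.2 ++ "      "] else st.1
  PySem.Str.join "\n" printtext

-- ===== PORT B =====
-- hand port of the step-2 slice xs[i::2] (PySem.List.slice has no step); exact: takes every other element
def stride2 : List String → List String
  | [] => []
  | [x] => [x]
  | x :: _ :: rest => x :: stride2 rest

def jointext_alt (textlist : List String) : String :=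
  let evens := stride2 textlist                  -- textlist[0::2]
  let odds := stride2 (textlist.drop 1)          -- textlist[1::2]
  let lines := List.zipWith (fun a b => a ++ "  " ++ b) evens odds
  -- evens[-1]: evens is nonempty whenever the branch is taken (odd length), so getLast?.getD "" is exact
  let lines := if textlist.length % 2 == 1 then lines ++ [evens.getLast?.getD "" ++ "      "] else lines
  PySem.Str.join "\n" lines

-- ===== PRECONDITION & SPEC =====
def Spec_jointext (textlist : List String) (out : String) : Prop := out = jointext_alt textlist
instance (textlist : List String) (out : String) : Decidable (Spec_jointext textlist out) := by unfold Spec_jointext; infer_instance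

-- ===== CLAIM (what is proved, stated in full; the proofs are below) =====
def Claim_equal_jointext : Prop := ∀ (textlist : List String), Dom_jointext textlist → Spec_jointext textlist (jointext textlist)

-- ===== LEMMAS AND PROOFS =====
-- proof-only intermediary: the common pairwise line list both programs produce
def jointextPairs : List String → List String
  | [] => []
  | [x] => [x ++ "      "]
  | x :: y :: rest => (x ++ "  " ++ y) :: jointextPairs rest

theorem stride2_cons (x : String) (l : List String) :
    stride2 (x :: l) = x :: stride2 (l.drop 1) := by
  cases l <;> simp [stride2]

-- Invariant of A's fold, both toggle phases at once (each case of the step uses the other phase at the tail).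
theorem jointext_fold_pairs : ∀ (l : List String),
    (∀ pt ft,
      (let st := l.foldl jointextStep (pt, true, ft)
       (if st.2.1 = false then st.1 ++ [st.2.2 ++ "      "] else st.1) = pt ++ jointextPairs l)
      ∧
      (let st := l.foldl jointextStep (pt, false, ft)
       (if st.2.1 = false then st.1 ++ [st.2.2 ++ "      "] else st.1) = pt ++ jointextPairs (ft :: l))) := by
  intro l
  induction l with
  | nil => intro pt ft; simp [jointextPairs]
  | cons x xs ih =>
      intro pt ft
      constructor
      · show (let st := (x :: xs).foldl jointextStep (pt, true, ft); _) = _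
        simp only [List.foldl_cons, jointextStep]
        exact (ih pt x).2
      · show (let st := (x :: xs).foldl jointextStep (pt, false, ft); _) = _
        simp only [List.foldl_cons, jointextStep]
        have h := (ih (pt ++ [ft ++ "  " ++ x]) ft).1
        simp only [List.append_assoc] at h ⊢
        simpa [jointextPairs] using h

-- B's staged passes produce the same pairwise line list
theorem alt_lines : ∀ (l : List String),
    (if l.length % 2 == 1 then
       List.zipWith (fun a b => a ++ "  " ++ b) (stride2 l) (stride2 (l.drop 1))
         ++ [(stride2 l).getLast?.getD "" ++ "      "]
     else List.zipWith (fun a b => a ++ "  " ++ b) (stride2 l) (stride2 (l.drop 1)))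
    = jointextPairs l := by
  intro l
  induction l using jointextPairs.induct with
  | case1 => simp [stride2, jointextPairs]
  | case2 x => simp [stride2, jointextPairs]
  | case3 x y rest ih =>
      have hev : stride2 (x :: y :: rest) = x :: stride2 rest := by
        rw [stride2_cons]; rfl
      have hod : stride2 ((x :: y :: rest).drop 1) = y :: stride2 (rest.drop 1) := by
        simpa using stride2_cons y rest
      have hc : (((x :: y :: rest).length) % 2 == 1) = ((rest.length) % 2 == 1) := by
        simp only [List.length_cons]; congr 1; omega
      rw [hev, hod, List.zipWith_cons_cons, hc]
      simp only [jointextPairs]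
      by_cases hodd : rest.length % 2 = 1
      · have hne : rest ≠ [] := by intro h; subst h; simp at hodd
        obtain ⟨r, rs, rfl⟩ := List.exists_cons_of_ne_nil hne
        have hs : stride2 (r :: rs) = r :: stride2 (rs.drop 1) := stride2_cons r rs
        have hcond : (((r :: rs).length % 2 == 1) = true) := by simpa using hodd
        rw [if_pos hcond] at ih ⊢
        rw [hs, List.getLast?_cons_cons, ← hs, List.cons_append, ih]
      · have hcond : ¬ (((rest).length % 2 == 1) = true) := by simpa using hodd
        rw [if_neg hcond] at ih ⊢
        rw [ih]

-- ===== VERDICT (by name: the statement is the Claim_ definition above) =====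
theorem jointext_spec : Claim_equal_jointext := by
  intro textlist _
  unfold Spec_jointext jointext jointext_alt
  have hA := (jointext_fold_pairs textlist [] "").1
  simp only [List.nil_append] at hA
  have hB := alt_lines textlist
  show PySem.Str.join "\n" _ = PySem.Str.join "\n" _
  rw [hA, ← hB]
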